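-- pv_equiv track=rewrite | github.com/campanulamediuml/apiPlatform | __etc__/judge.py | forth_cal
-- ===== SOURCE A (Python) =====
-- def forth_cal(x):
--     list = []
--     while x > 3:
--         list.append(str(x % 4))
--         x = x // 4
--     if x:
--         list.append(str(x))
--     x = ''.join(reversed(list))
--     while 1:
--         if len(x) < 10:
--             x = '0'+x
--         else:
--             break
--     return x
-- ===== SOURCE B (Python) =====
-- def _conv(n):
--     if n > 3:
--         return _conv(n // 4) + str(n % 4)
--     return str(n) if n else ''
--
-- def forth_cal(x):
--     return _conv(x).rjust(10, '0')
-- ===== Notes on version B (the rewrite author's own statement) =====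
-- stated objective: simpler
-- what changed: Replaces the while-loop that accumulates least-significant digits in a list, reverses and joins them, plus a second padding while-loop, with a short recursive helper that emits digits most-significant-first and a single rjust for the padding.
import Mathlib
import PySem

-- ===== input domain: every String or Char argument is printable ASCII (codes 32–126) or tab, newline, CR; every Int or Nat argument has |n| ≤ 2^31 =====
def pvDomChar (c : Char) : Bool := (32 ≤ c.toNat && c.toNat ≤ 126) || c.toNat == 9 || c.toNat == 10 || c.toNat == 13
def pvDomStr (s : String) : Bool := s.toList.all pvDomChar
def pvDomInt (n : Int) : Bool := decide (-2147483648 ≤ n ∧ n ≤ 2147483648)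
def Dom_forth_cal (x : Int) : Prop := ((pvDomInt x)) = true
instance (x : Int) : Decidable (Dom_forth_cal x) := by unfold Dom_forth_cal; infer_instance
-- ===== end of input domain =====

-- B replaces A's digit-list + reverse/join + padding while-loop with a recursive
-- most-significant-first digit builder and a single rjust; same cost, simpler shape.


-- ===== PORT A =====
-- the while-loop: returns (final x, list) with digits appended least-significant-first
def forthLoopA (x : Int) (l : List (List Char)) : Int × List (List Char) :=
  if x > 3 then
    forthLoopA (PySem.Int.floordiv x 4) (l ++ [PySem.Int.toChars (PySem.Int.mod x 4)])
  else (x, l)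
termination_by x.toNat
decreasing_by
  rename_i h
  rw [PySem.Int.floordiv_eq_ediv_of_pos (by norm_num)]
  omega

-- the padding while-loop: prepend '0' while len < 10
def forthPadA (s : List Char) : List Char :=
  if s.length < 10 then forthPadA ('0' :: s) else s
termination_by 10 - s.length

def forth_cal (x : Int) : String :=
  let p := forthLoopA x []
  let l := if p.1 ≠ 0 then p.2 ++ [PySem.Int.toChars p.1] else p.2
  String.ofList (forthPadA (l.reverse.flatten))

-- ===== PORT B =====
-- recursive base-4 digits, most-significant-first; '' for 0, str(n) for 0<|n|≤3 or n<0
def forthConvB (n : Int) : List Char :=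
  if n > 3 then forthConvB (PySem.Int.floordiv n 4) ++ PySem.Int.toChars (PySem.Int.mod n 4)
  else if n ≠ 0 then PySem.Int.toChars n else []
termination_by n.toNat
decreasing_by
  rename_i h
  rw [PySem.Int.floordiv_eq_ediv_of_pos (by norm_num)]
  omega

def forth_cal_alt (x : Int) : String :=
  let s := forthConvB x
  String.ofList (List.replicate (10 - s.length) '0' ++ s)

-- ===== PRECONDITION & SPEC =====
def Spec_forth_cal (x : Int) (out : String) : Prop := out = forth_cal_alt x
instance (x : Int) (out : String) : Decidable (Spec_forth_cal x out) := by unfold Spec_forth_cal; infer_instance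

-- ===== CLAIM (what is proved, stated in full; the proofs are below) =====
def Claim_equal_forth_cal : Prop := ∀ (x : Int), Dom_forth_cal x → Spec_forth_cal x (forth_cal x)

-- ===== LEMMAS AND PROOFS =====

theorem forthLoopA_of_gt {x : Int} (h : x > 3) (l : List (List Char)) :
    forthLoopA x l = forthLoopA (PySem.Int.floordiv x 4) (l ++ [PySem.Int.toChars (PySem.Int.mod x 4)]) := by
  rw [forthLoopA, if_pos h]

theorem forthLoopA_of_le {x : Int} (h : ¬ x > 3) (l : List (List Char)) :
    forthLoopA x l = (x, l) := by
  rw [forthLoopA, if_neg h]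

-- the loop's joined/reversed output (with the trailing if-append) is exactly B's recursion
theorem forthLoopA_conv (x : Int) (l : List (List Char)) :
    ((if (forthLoopA x l).1 ≠ 0 then (forthLoopA x l).2 ++ [PySem.Int.toChars (forthLoopA x l).1]
      else (forthLoopA x l).2).reverse.flatten)
      = forthConvB x ++ l.reverse.flatten := by
  induction x, l using forthLoopA.induct with
  | case1 x l h ih =>
    rw [forthLoopA_of_gt h, ih]
    conv_rhs => rw [forthConvB, if_pos h]
    simp
  | case2 x l h =>
    rw [forthLoopA_of_le h]
    conv_rhs => rw [forthConvB, if_neg h]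
    by_cases hx : x = 0 <;> simp [hx]

-- padding loop = rjust with '0'
theorem forthPadA_eq (s : List Char) :
    forthPadA s = List.replicate (10 - s.length) '0' ++ s := by
  induction s using forthPadA.induct with
  | case1 s h ih =>
    rw [forthPadA, if_pos h, ih]
    have h10 : 10 - s.length = (10 - ('0' :: s).length) + 1 := by simp; omega
    rw [h10, List.replicate_succ']
    simp
  | case2 s h =>
    rw [forthPadA, if_neg h]
    have : 10 - s.length = 0 := by omega
    simp [this]

-- ===== VERDICT (by name: the statement is the Claim_ definition above) =====
theorem forth_cal_spec : Claim_equal_forth_cal := by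
  intro x _
  show forth_cal x = forth_cal_alt x
  rw [forth_cal, forth_cal_alt]
  have h := forthLoopA_conv x []
  simp only [List.reverse_nil, List.flatten_nil, List.append_nil] at h
  simp only [h, forthPadA_eq]
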